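-- pv_equiv track=rewrite | github.com/sutracodehq-ui/sutra-ai-engine | app/services/intelligence/brain.py | _order_chain_for_route_hint
-- ===== SOURCE A (Python) =====
-- def _order_chain_for_route_hint(chain: list[str], route_hint: str) -> list[str]:
--     """Reorder driver chain using Redis quality routing hints (never blocks routing)."""
--     locals_first = frozenset({"ollama", "bitnet"})
--     if not chain:
--         return chain
--     if route_hint == "fast_local":
--         return [d for d in chain if d in locals_first] + [d for d in chain if d not in locals_first]
--     if route_hint == "direct_cloud":
--         return [d for d in chain if d not in locals_first] + [d for d in chain if d in locals_first]
--     return list(chain)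
-- ===== SOURCE B (Python) =====
-- def _order_chain_for_route_hint(chain: list[str], route_hint: str) -> list[str]:
--     """Reorder driver chain via a stable sort on a boolean locality key."""
--     if not chain:
--         return chain
--     if route_hint == "fast_local":
--         return sorted(chain, key=lambda d: d not in ("ollama", "bitnet"))
--     if route_hint == "direct_cloud":
--         return sorted(chain, key=lambda d: d in ("ollama", "bitnet"))
--     return list(chain)
-- ===== Notes on version B (the rewrite author's own statement) =====
-- stated objective: alternative
-- what changed: Replaces A's filter-and-concatenate partition (two comprehension scans per branch) with a stable sort of the chain under a boolean locality key; stability makes the sorted order coincide with the partition order.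
import Mathlib
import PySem

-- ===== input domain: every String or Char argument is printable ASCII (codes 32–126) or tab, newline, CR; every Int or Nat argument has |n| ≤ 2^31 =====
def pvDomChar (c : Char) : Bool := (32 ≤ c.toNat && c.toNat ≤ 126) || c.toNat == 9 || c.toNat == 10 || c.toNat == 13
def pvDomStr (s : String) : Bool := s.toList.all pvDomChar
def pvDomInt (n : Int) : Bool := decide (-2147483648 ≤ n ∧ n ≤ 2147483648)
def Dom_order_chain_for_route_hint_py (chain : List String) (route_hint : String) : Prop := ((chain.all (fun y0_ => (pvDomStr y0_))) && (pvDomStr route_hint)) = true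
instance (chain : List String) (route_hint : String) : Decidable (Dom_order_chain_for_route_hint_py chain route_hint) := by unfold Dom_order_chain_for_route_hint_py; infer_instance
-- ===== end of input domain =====

-- B replaces A's filter-and-concatenate partition with a stable sort under a boolean locality key (alternative decomposition, same results).

-- ===== PORT A =====
def order_chain_for_route_hint_py (chain : List String) (route_hint : String) : List String :=
  let locals_first : PySem.Set String := PySem.Set.ofList ["ollama", "bitnet"]
  if chain = [] then chain
  else if route_hint = "fast_local" then
    (chain.filter (fun d => PySem.Set.contains locals_first d))
      ++ (chain.filter (fun d => !(PySem.Set.contains locals_first d)))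
  else if route_hint = "direct_cloud" then
    (chain.filter (fun d => !(PySem.Set.contains locals_first d)))
      ++ (chain.filter (fun d => PySem.Set.contains locals_first d))
  else chain

-- ===== PORT B =====
-- Python's bool sort key (False < True) is ported as a Nat 0/1 key, exact for sorted's ordering.
def order_chain_for_route_hint_py_alt (chain : List String) (route_hint : String) : List String :=
  if chain = [] then chain
  else if route_hint = "fast_local" then
    PySem.List.sorted chain (fun d => if d = "ollama" ∨ d = "bitnet" then (0 : Nat) else 1) false
  else if route_hint = "direct_cloud" then
    PySem.List.sorted chain (fun d => if d = "ollama" ∨ d = "bitnet" then (1 : Nat) else 0) false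
  else chain

-- ===== PRECONDITION & SPEC =====
def Spec_order_chain_for_route_hint_py (chain : List String) (route_hint : String) (out : List String) : Prop := out = order_chain_for_route_hint_py_alt chain route_hint
instance (chain : List String) (route_hint : String) (out : List String) : Decidable (Spec_order_chain_for_route_hint_py chain route_hint out) := by unfold Spec_order_chain_for_route_hint_py; infer_instance

-- ===== CLAIM =====
def Claim_equal_order_chain_for_route_hint_py : Prop := ∀ (chain : List String) (route_hint : String), Dom_order_chain_for_route_hint_py chain route_hint → Spec_order_chain_for_route_hint_py chain route_hint (order_chain_for_route_hint_py chain route_hint)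

-- ===== LEMMAS AND PROOFS =====

-- insertBy of x lands exactly between a prefix it does not go before and a suffix it goes before.
lemma insertBy_split {α : Type} (before : α → α → Bool) (x : α) (f r : List α)
    (hf : ∀ a ∈ f, before x a = false) (hr : ∀ b ∈ r, before x b = true) :
    PySem.List.insertBy before x (f ++ r) = f ++ x :: r := by
  induction f with
  | nil =>
    cases r with
    | nil => simp [PySem.List.insertBy]
    | cons b bs => simp [PySem.List.insertBy, hr b (by simp)]
  | cons a f' ih =>
    have ha : before x a = false := hf a (by simp)
    simp [List.cons_append, PySem.List.insertBy, ha,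
      ih (fun b hb => hf b (by simp [hb]))]

-- Stable sort under a 0/1 key is the stable partition: p-elements first, in order.
lemma sorted_bool_key_eq_partition {α : Type} [DecidableEq α] (xs : List α) (p : α → Bool) :
    PySem.List.sorted xs (fun d => if p d then (0 : Nat) else 1) false
      = xs.filter p ++ xs.filter (fun d => !p d) := by
  have key : ∀ (l f r : List α), (∀ a ∈ f, p a = true) → (∀ b ∈ r, p b = false) →
      l.foldl (fun acc x =>
          PySem.List.insertBy
            (fun a b => decide ((if p a then (0 : Nat) else 1) < (if p b then (0 : Nat) else 1)))
            x acc) (f ++ r)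
        = (f ++ l.filter p) ++ (r ++ l.filter (fun d => !p d)) := by
    intro l
    induction l with
    | nil => intro f r _ _; simp
    | cons x t ih =>
      intro f r hf hr
      by_cases hx : p x = true
      · have : PySem.List.insertBy
            (fun a b => decide ((if p a then (0 : Nat) else 1) < (if p b then (0 : Nat) else 1)))
            x (f ++ r) = f ++ x :: r := by
          apply insertBy_split
          · intro a ha; simp [hx, hf a ha]
          · intro b hb; simp [hx, hr b hb]
        have := ih (f ++ [x]) r (by intro a ha; rcases List.mem_append.1 ha with h | h
                                    · exact hf a h
                                    · simp at h; simpa [h] using hx) hr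
        simp only [List.foldl_cons, ‹PySem.List.insertBy _ x (f ++ r) = f ++ x :: r›]
        have hfx : f ++ x :: r = (f ++ [x]) ++ r := by simp
        rw [hfx, this]
        simp [List.filter_cons, hx]
      · have hx' : p x = false := by simpa using hx
        have : PySem.List.insertBy
            (fun a b => decide ((if p a then (0 : Nat) else 1) < (if p b then (0 : Nat) else 1)))
            x (f ++ r) = (f ++ r) ++ [x] := by
          have := insertBy_split
            (fun a b => decide ((if p a then (0 : Nat) else 1) < (if p b then (0 : Nat) else 1)))
            x (f ++ r) []
            (by intro a ha
                rcases List.mem_append.1 ha with h | h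
                · simp [hx', hf a h]
                · simp [hx', hr a h])
            (by intro b hb; simp at hb)
          simpa using this
        have := ih f (r ++ [x]) hf (by intro b hb; rcases List.mem_append.1 hb with h | h
                                       · exact hr b h
                                       · simp at h; simpa [h] using hx')
        simp only [List.foldl_cons, ‹PySem.List.insertBy _ x (f ++ r) = (f ++ r) ++ [x]›]
        rw [List.append_assoc, this]
        simp [List.filter_cons, hx']
  simpa [PySem.List.sorted] using key xs [] []

lemma contains_locals (d : String) :
    PySem.Set.contains (PySem.Set.ofList ["ollama", "bitnet"]) d
      = decide (d = "ollama" ∨ d = "bitnet") := by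
  by_cases h1 : d = "ollama" <;> by_cases h2 : d = "bitnet" <;>
    simp [PySem.Set.contains, PySem.Set.ofList, PySem.Set.add, PySem.Set.empty, h1, h2]

-- ===== VERDICT =====
theorem order_chain_for_route_hint_py_spec : Claim_equal_order_chain_for_route_hint_py := by
  intro chain route_hint _
  unfold Spec_order_chain_for_route_hint_py order_chain_for_route_hint_py order_chain_for_route_hint_py_alt
  by_cases hc : chain = []
  · simp [hc]
  · by_cases h1 : route_hint = "fast_local"
    · have hkey : (fun d => if d = "ollama" ∨ d = "bitnet" then (0 : Nat) else 1)
          = (fun d : String => if (decide (d = "ollama" ∨ d = "bitnet")) then (0 : Nat) else 1) := by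
        funext d; by_cases h : d = "ollama" ∨ d = "bitnet" <;> simp [h]
      simp only [hc, h1, if_neg, if_pos, if_false, if_true, hkey,
        sorted_bool_key_eq_partition chain (fun d => decide (d = "ollama" ∨ d = "bitnet"))]
      simp [contains_locals]
    · by_cases h2 : route_hint = "direct_cloud"
      · have hkey : (fun d => if d = "ollama" ∨ d = "bitnet" then (1 : Nat) else 0)
            = (fun d : String => if (!decide (d = "ollama" ∨ d = "bitnet")) then (0 : Nat) else 1) := by
          funext d; by_cases h : d = "ollama" ∨ d = "bitnet" <;> simp [h]
        simp only [hc, h1, h2, if_neg, if_pos, if_false, if_true, hkey,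
          sorted_bool_key_eq_partition chain (fun d => !decide (d = "ollama" ∨ d = "bitnet"))]
        simp [contains_locals]
      · simp [hc, h1, h2]
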